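-- pv_equiv track=rewrite | github.com/kunla1ve/mini-programme | 天地癞子/任意一方有软炸.py | has_soft_bomb
-- ===== SOURCE A (Python) =====
-- from collections import Counter
--
-- def is_laizi(card, laizi_points):
--     """
--     判断一张牌是否为癞子
--     注意：大小王不能作为癞子
--     参数:
--         card: 牌面值（数字或字符串）
--         laizi_points: 癞子点数集合
--     返回:
--         True表示是癞子，False表示不是
--     """
--     # 大小王永远不能作为癞子
--     if card in ['joker', 'JOKER']:
--         return False
--     return card in laizi_points
--
-- def has_soft_bomb(hand, laizi_points, m):
--     """
--     判断一手牌是否包含m张软炸（癞子可替代其他牌形成炸弹）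
--     软炸定义：由t张相同点数的普通牌 + (m-t)张癞子组成，其中1≤t≤m（至少1张普通牌）
--     注意：大小王不能作为软炸的元素
--
--     参数:
--         hand: 手牌列表
--         laizi_points: 癞子点数集合
--         m: 软炸所需的总张数
--     返回:
--         True表示有软炸，False表示没有
--     """
--     # 统计手牌中的癞子数量（排除大小王）
--     laizi_count = sum(1 for c in hand if is_laizi(c, laizi_points))
--
--     # 统计非癞子、非王牌的普通牌数量
--     normal_counts = Counter()
--     for c in hand:
--         # 排除癞子、大小王（大小王不能作为软炸元素）
--         if not is_laizi(c, laizi_points) and c not in ['joker', 'JOKER']: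
--             normal_counts[c] += 1
--
--     # 检查每种点数的牌能否与癞子组合成m张软炸
--     for cnt in normal_counts.values():
--         # t是实际普通牌的数量，从1到cnt（至少1张普通牌）
--         for t in range(1, cnt + 1):
--             need_laizi = m - t  # 需要的癞子数量
--             # 需要的癞子数量必须在0到laizi_count之间
--             # 且t >= 1（已有保证），且need_laizi >= 0
--             if 0 <= need_laizi <= laizi_count:
--                 return True
--
--     # 全癞子不能算软炸（因为没有普通牌），所以这里不检查laizi_count >= m的情况
--
--     return False
-- ===== SOURCE B (Python) =====
-- def has_soft_bomb(hand, laizi_points, m):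
--     # Single pass: count wildcards and per-value normal counts together,
--     # then an O(1) arithmetic check per distinct value (no inner t-loop).
--     if m < 1:
--         return False
--     laizi = 0
--     counts = {}
--     for c in hand:
--         if c == 'joker' or c == 'JOKER':
--             continue
--         if c in laizi_points:
--             laizi += 1
--         else:
--             counts[c] = counts.get(c, 0) + 1
--     need = m - laizi
--     if need < 1:
--         need = 1
--     return any(cnt >= need for cnt in counts.values())
-- ===== Notes on version B (the rewrite author's own statement) =====
-- stated objective: faster
-- what changed: Replaces A's two passes over the hand plus a per-value inner loop over t=1..cnt with one combined counting pass and an O(1) interval-nonemptiness check (cnt >= max(1, m - laizi)) per distinct value.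
import Mathlib
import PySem

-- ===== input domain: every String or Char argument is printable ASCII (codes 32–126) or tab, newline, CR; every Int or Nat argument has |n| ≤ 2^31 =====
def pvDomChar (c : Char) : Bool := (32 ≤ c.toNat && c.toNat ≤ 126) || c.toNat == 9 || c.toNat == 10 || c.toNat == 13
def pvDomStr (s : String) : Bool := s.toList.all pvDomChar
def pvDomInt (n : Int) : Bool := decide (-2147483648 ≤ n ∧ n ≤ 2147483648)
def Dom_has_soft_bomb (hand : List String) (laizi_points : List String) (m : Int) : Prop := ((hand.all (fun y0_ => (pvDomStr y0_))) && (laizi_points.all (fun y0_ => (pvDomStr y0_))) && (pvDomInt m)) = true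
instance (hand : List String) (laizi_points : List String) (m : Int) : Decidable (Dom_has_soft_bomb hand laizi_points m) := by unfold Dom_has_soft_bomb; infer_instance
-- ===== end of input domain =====

-- B fuses A's two counting passes into one and replaces the inner t-loop by an O(1) arithmetic check; equivalence proved on the full domain.


-- ===== PORT A =====
-- card in ['joker','JOKER'] → False; else card in laizi_points
def is_laizi (card : String) (laizi_points : List String) : Bool :=
  if (["joker", "JOKER"] : List String).contains card then false
  else laizi_points.contains card

def has_soft_bomb (hand : List String) (laizi_points : List String) (m : Int) : Bool :=
  -- laizi_count = sum(1 for c in hand if is_laizi(c, laizi_points))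
  let laizi_count : Int :=
    (hand.filter (fun c => is_laizi c laizi_points)).map (fun _ => (1 : Int)) |>.sum
  -- normal_counts = Counter(); for c in hand: if not is_laizi and c not in jokers: normal_counts[c] += 1
  let normal_counts : PySem.Dict String Int :=
    hand.foldl (fun d c =>
      if !is_laizi c laizi_points && !(["joker", "JOKER"] : List String).contains c then
        d.modify c 0 (· + 1)
      else d) PySem.Dict.empty
  -- for cnt in values: for t in range(1, cnt+1): if 0 <= m-t <= laizi_count: return True
  normal_counts.values.any (fun cnt =>
    (PySem.List.pyRange 1 (cnt + 1) 1).any (fun t =>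
      decide (0 ≤ m - t ∧ m - t ≤ laizi_count)))

-- ===== PORT B =====
def has_soft_bomb_alt (hand : List String) (laizi_points : List String) (m : Int) : Bool :=
  if m < 1 then false
  else
    -- one pass: (laizi, counts)
    let st : Int × PySem.Dict String Int :=
      hand.foldl (fun st c =>
        if c == "joker" || c == "JOKER" then st
        else if laizi_points.contains c then (st.1 + 1, st.2)
        else (st.1, st.2.insert c (st.2.getD c 0 + 1)))
        ((0 : Int), PySem.Dict.empty)
    -- need = m - laizi; if need < 1: need = 1
    let need : Int := if m - st.1 < 1 then 1 else m - st.1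
    st.2.values.any (fun cnt => decide (need ≤ cnt))

-- ===== PRECONDITION & SPEC =====
def Spec_has_soft_bomb (hand : List String) (laizi_points : List String) (m : Int) (out : Bool) : Prop := out = has_soft_bomb_alt hand laizi_points m
instance (hand : List String) (laizi_points : List String) (m : Int) (out : Bool) : Decidable (Spec_has_soft_bomb hand laizi_points m out) := by unfold Spec_has_soft_bomb; infer_instance

-- ===== CLAIM (what is proved, stated in full; the proofs are below) =====
def Claim_equal_has_soft_bomb : Prop := ∀ (hand : List String) (laizi_points : List String) (m : Int), Dom_has_soft_bomb hand laizi_points m → Spec_has_soft_bomb hand laizi_points m (has_soft_bomb hand laizi_points m)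

-- ===== LEMMAS AND PROOFS =====

-- Dict.modify with default is definitionally insert of (getD + 1)
lemma modify_eq_insert (d : PySem.Dict String Int) (k : String) :
    d.modify k 0 (· + 1) = d.insert k (d.getD k 0 + 1) :=
  PySem.Dict.ext_iff.mpr rfl

-- B's single pass computes A's laizi count and A's counter simultaneously.
lemma pair_fold (hand laizi_points : List String) (a : Int) (d : PySem.Dict String Int) :
    hand.foldl (fun st c =>
        if c == "joker" || c == "JOKER" then st
        else if laizi_points.contains c then (st.1 + 1, st.2)
        else (st.1, st.2.insert c (st.2.getD c 0 + 1))) (a, d)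
    = (a + ((hand.filter (fun c => is_laizi c laizi_points)).map (fun _ => (1 : Int))).sum,
       hand.foldl (fun d c =>
        if !is_laizi c laizi_points && !(["joker", "JOKER"] : List String).contains c then
          d.modify c 0 (· + 1)
        else d) d) := by
  induction hand generalizing a d with
  | nil => simp
  | cons c rest ih =>
    by_cases hj : c = "joker" ∨ c = "JOKER"
    · have h1 : (c == "joker" || c == "JOKER") = true := by
        rcases hj with h | h <;> subst h <;> decide
      have h3 : (["joker", "JOKER"] : List String).contains c = true := by
        rcases hj with h | h <;> subst h <;> decide
      have h2 : is_laizi c laizi_points = false := by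
        unfold is_laizi; rw [h3]; rfl
      simp only [List.foldl_cons, List.filter_cons, h1, h2, h3, Bool.not_true,
        Bool.and_false, if_true, if_false, Bool.false_eq_true]
      exact ih a d
    · have hj1 : c ≠ "joker" := fun h => hj (Or.inl h)
      have hj2 : c ≠ "JOKER" := fun h => hj (Or.inr h)
      have h1 : (c == "joker" || c == "JOKER") = false := by
        simp [hj1, hj2]
      have h3 : (["joker", "JOKER"] : List String).contains c = false := by
        simp [hj1, hj2]
      have h2 : is_laizi c laizi_points = laizi_points.contains c := by
        unfold is_laizi; rw [h3]; rfl
      by_cases hl : laizi_points.contains c = true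
      · have h2' : is_laizi c laizi_points = true := h2.trans hl
        simp only [List.foldl_cons, List.filter_cons, h1, h2', h3, hl, Bool.not_true,
          Bool.false_and, if_true, if_false, Bool.false_eq_true, List.map_cons,
          List.sum_cons]
        rw [ih (a + 1) d]
        rw [Prod.ext_iff]
        exact ⟨by dsimp only; omega, rfl⟩
      · have hl' : laizi_points.contains c = false := by
          cases hcl : laizi_points.contains c
          · rfl
          · exact absurd hcl hl
        have h2' : is_laizi c laizi_points = false := h2.trans hl'
        simp only [List.foldl_cons, List.filter_cons, h1, h2', h3, hl', Bool.not_false,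
          Bool.true_and, if_true, if_false, Bool.false_eq_true, modify_eq_insert]
        exact ih a (d.insert c (d.getD c 0 + 1))

lemma laizi_count_nonneg (hand laizi_points : List String) :
    0 ≤ ((hand.filter (fun c => is_laizi c laizi_points)).map (fun _ => (1 : Int))).sum := by
  induction hand with
  | nil => simp
  | cons c rest ih =>
    rw [List.filter_cons]
    split_ifs
    · rw [List.map_cons, List.sum_cons]; omega
    · exact ih

-- A's inner t-loop over range(1, cnt+1) is the interval-nonemptiness test.
lemma inner_loop (m L cnt : Int) (hm : 1 ≤ m) (hL : 0 ≤ L) :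
    ((PySem.List.pyRange 1 (cnt + 1) 1).any (fun t =>
      decide (0 ≤ m - t ∧ m - t ≤ L)))
    = decide ((if m - L < 1 then 1 else m - L) ≤ cnt) := by
  rw [Bool.eq_iff_iff]
  simp only [List.any_eq_true, PySem.List.mem_pyRange_one, decide_eq_true_eq]
  constructor
  · rintro ⟨t, ⟨ht1, ht2⟩, h3, h4⟩
    split_ifs <;> omega
  · intro h
    refine ⟨if m - L < 1 then 1 else m - L, ?_, ?_, ?_⟩ <;> split_ifs at h ⊢ <;> omega

-- When m < 1 the inner condition 0 ≤ m - t (with t ≥ 1) never holds, so A returns false.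
lemma a_false_of_m_lt_one (hand laizi_points : List String) (m : Int) (hm : m < 1) :
    has_soft_bomb hand laizi_points m = false := by
  unfold has_soft_bomb
  refine List.any_eq_false.mpr ?_
  intro cnt _
  simp only [List.any_eq_true, PySem.List.mem_pyRange_one, decide_eq_true_eq, not_exists,
    not_and]
  intro t ht h0
  omega

-- ===== VERDICT (by name: the statement is the Claim_ definition above) =====
theorem has_soft_bomb_spec : Claim_equal_has_soft_bomb := by
  intro hand laizi_points m _
  unfold Spec_has_soft_bomb
  by_cases hm : m < 1
  · rw [a_false_of_m_lt_one hand laizi_points m hm]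
    simp [has_soft_bomb_alt, hm]
  · unfold has_soft_bomb has_soft_bomb_alt
    rw [if_neg hm]
    rw [pair_fold hand laizi_points 0 PySem.Dict.empty]
    simp only [zero_add]
    congr 1
    funext cnt
    exact inner_loop m _ cnt (by omega) (laizi_count_nonneg hand laizi_points)
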